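-- pv_equiv track=rewrite | github.com/cosmologicon/puzlink | report/src/trie.py | get_prefix_to_subset
-- ===== SOURCE A (Python) =====
-- def get_prefix_to_subset(wordset):
-- 	from collections import defaultdict
-- 	letters_to_word_subset = defaultdict(set)
-- 	for word in wordset:
-- 		if not word:
-- 			continue
-- 		letters_to_word_subset[word[0]].add(word[1:])
-- 	prefix_to_subset = {"": frozenset(wordset)}
-- 	for letter, word_subset in letters_to_word_subset.items():
-- 		prefix_to_subset[letter] = frozenset(word_subset)
-- 		for prefix, subset in get_prefix_to_subset(word_subset).items():
-- 			prefix_to_subset[letter + prefix] = subset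
-- 	return prefix_to_subset
-- ===== SOURCE B (Python) =====
-- def get_prefix_to_subset(wordset):
--     items = []
--     stack = [("", list(dict.fromkeys(wordset)))]
--     while stack:
--         prefix, words = stack.pop()
--         items.append((prefix, frozenset(words)))
--         letters = list(dict.fromkeys(w[0] for w in words if w))
--         for letter in reversed(letters):
--             suffixes = list(dict.fromkeys(w[1:] for w in words if w and w[0] == letter))
--             stack.append((prefix + letter, suffixes))
--     return dict(items)
-- ===== Notes on version B (the rewrite author's own statement) =====
-- stated objective: alternative
-- what changed: Replaces A's recursion (per-level defaultdict grouping, recursive calls whose returned dicts are re-keyed with the letter prepended to every prefix) by an iterative explicit-stack preorder traversal that carries the full prefix with each pending node and emits each (prefix, suffix-set) pair exactly once, with per-letter suffix groups computed by dedup-filter comprehensions instead of a dict of sets.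
import Mathlib
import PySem

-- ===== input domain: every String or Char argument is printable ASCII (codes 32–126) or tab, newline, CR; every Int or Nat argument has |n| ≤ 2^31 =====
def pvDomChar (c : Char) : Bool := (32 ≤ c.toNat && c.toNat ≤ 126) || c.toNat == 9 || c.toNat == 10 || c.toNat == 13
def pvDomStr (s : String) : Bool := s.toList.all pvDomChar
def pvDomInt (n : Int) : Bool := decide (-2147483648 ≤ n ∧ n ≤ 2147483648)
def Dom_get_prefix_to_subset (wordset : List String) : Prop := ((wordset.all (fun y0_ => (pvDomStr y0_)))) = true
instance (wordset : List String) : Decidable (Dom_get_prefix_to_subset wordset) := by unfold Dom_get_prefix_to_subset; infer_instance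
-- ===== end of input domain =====

-- B replaces A's recursion by an iterative explicit-stack preorder traversal of the prefix trie
-- (objective: alternative decomposition; the equivalence proved is about the RETURN value).
-- Both ports work on words as List Char (PySem string functions are defined on List Char);
-- the final map turns the char-list prefixes/suffixes back into Strings.

-- ===== PORT A =====
-- total length of all words; used only to give A's set recursion enough fuel (one unit per level)
def pvMu (ws : List (List Char)) : Nat := (ws.map List.length).sum

-- letters_to_word_subset: defaultdict(set); skip empty words; key = word[0], add word[1:]
def pvGroupsA (ws : List (List Char)) : PySem.Dict Char (PySem.Set (List Char)) :=
  ws.foldl (fun d word =>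
      match word with
      | [] => d
      | c :: rest => d.modify c [] (fun s => PySem.Set.add s rest))
    PySem.Dict.empty

-- the recursion of A, fuel-guarded (the proofs show fuel pvMu ws + 1 is never exhausted)
def pvARec : Nat → List (List Char) → PySem.Dict (List Char) (PySem.Set (List Char))
  | 0, _ => PySem.Dict.empty
  | fuel + 1, ws =>
    (pvGroupsA ws).items.foldl
      (fun acc lg =>
        ((pvARec fuel lg.2).items).foldl
          (fun a ps => a.insert (lg.1 :: ps.1) ps.2)             -- prefix_to_subset[letter + prefix] = subset
          (acc.insert [lg.1] (PySem.Set.ofList lg.2)))           -- prefix_to_subset[letter] = frozenset(word_subset)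
      (PySem.Dict.empty.insert [] (PySem.Set.ofList ws))         -- {"": frozenset(wordset)}

def get_prefix_to_subset (wordset : List String) : List (String × List String) :=
  ((pvARec (pvMu (wordset.map String.toList) + 1) (wordset.map String.toList)).items).map
    (fun ps => (String.ofList ps.1, ps.2.map String.ofList))

-- ===== PORT B =====
-- letters = list(dict.fromkeys(w[0] for w in words if w))
def pvLettersB (ws : List (List Char)) : List Char :=
  PySem.List.dedup (ws.filterMap List.head?)

-- (w[1:] for w in words if w and w[0] == letter)
def pvRawB (c : Char) (ws : List (List Char)) : List (List Char) :=
  (ws.filter (fun w => w.head? == some c)).map (fun w => w.drop 1)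

-- suffixes = list(dict.fromkeys(...))
def pvSufsB (c : Char) (ws : List (List Char)) : List (List Char) :=
  PySem.List.dedup (pvRawB c ws)

-- total length of all words, as B's loop computes it (fuel bound for the while loop)
def pvMuB (ws : List (List Char)) : Nat := ws.foldl (fun n w => n + w.length) 0

-- the while loop: stack of (prefix, words) with the top at the head; each iteration pops one node,
-- appends its (prefix, frozenset(words)) item and pushes the children (reversed, so they pop in
-- letter order).  Fuel-guarded (one unit per pop; the proofs show it is never exhausted).
def pvBLoop : Nat → List (List Char × List (List Char)) → List (List Char × PySem.Set (List Char)) →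
    List (List Char × PySem.Set (List Char))
  | 0, _, items => items
  | _ + 1, [], items => items
  | fuel + 1, pw :: rest, items =>
    pvBLoop fuel
      ((pvLettersB pw.2).reverse.foldl (fun st c => (pw.1 ++ [c], pvSufsB c pw.2) :: st) rest)
      (items ++ [(pw.1, PySem.Set.ofList pw.2)])

def get_prefix_to_subset_alt (wordset : List String) : List (String × List String) :=
  (PySem.Dict.ofList
      (pvBLoop (pvMuB ((PySem.List.dedup wordset).map String.toList) + 1)
        [([], (PySem.List.dedup wordset).map String.toList)] [])).items.map
    (fun ps => (String.ofList ps.1, ps.2.map String.ofList))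

-- ===== PRECONDITION & SPEC =====
-- The Python argument is a set of strings; its agreed List representation holds DISTINCT elements.
-- Pre_ only records that shape invariant (it excludes no input the Python function is ever given).
def Pre_get_prefix_to_subset (wordset : List String) : Prop := wordset.Nodup
instance (wordset : List String) : Decidable (Pre_get_prefix_to_subset wordset) := by
  unfold Pre_get_prefix_to_subset; infer_instance

def pvWitness_get_prefix_to_subset : List String := ["ab", "b", ""]

def Spec_get_prefix_to_subset (wordset : List String) (out : List (String × List String)) : Prop :=
  out = get_prefix_to_subset_alt wordset
instance (wordset : List String) (out : List (String × List String)) :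
    Decidable (Spec_get_prefix_to_subset wordset out) := by
  unfold Spec_get_prefix_to_subset; infer_instance

-- ===== CLAIM (what is proved, stated in full; the proofs are below) =====
def Claim_equal_get_prefix_to_subset : Prop :=
  ∀ (wordset : List String), Dom_get_prefix_to_subset wordset →
    Pre_get_prefix_to_subset wordset →
      Spec_get_prefix_to_subset wordset (get_prefix_to_subset wordset)

-- ===== LEMMAS AND PROOFS =====

-- the common specification: preorder (DFS) enumeration of the prefix trie, fuel per level
def pvDfs : Nat → List (List Char) → List (List Char × PySem.Set (List Char))
  | 0, ws => [([], PySem.Set.ofList ws)]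
  | fuel + 1, ws =>
    ([], PySem.Set.ofList ws) ::
      (pvLettersB ws).flatMap (fun c =>
        (pvDfs fuel (pvSufsB c ws)).map (fun ps => (c :: ps.1, ps.2)))

-- ---- measure facts ----
theorem pv_muB_eq (ws : List (List Char)) : pvMuB ws = pvMu ws := by
  have gen : ∀ (l : List (List Char)) (n : Nat),
      l.foldl (fun n w => n + w.length) n = n + pvMu l := by
    intro l
    induction l with
    | nil => intro n; simp [pvMu]
    | cons w l ih =>
      intro n
      simp only [List.foldl_cons, ih, pvMu, List.map_cons, List.sum_cons]
      omega
  simpa [pvMuB] using gen ws 0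

theorem pv_dedup_sublist {α : Type} [BEq α] [LawfulBEq α] (xs : List α) :
    (PySem.List.dedup xs).Sublist xs := by
  have h : ∀ (ys : List α), (PySem.Set.ofList ys).Sublist ys := by
    intro ys
    induction ys with
    | nil => simp [PySem.Set.ofList]
    | cons x ys ih =>
      rw [PySem.Set.ofList_cons]
      refine List.Sublist.cons₂ x (List.Sublist.trans ?_ ih)
      simpa [PySem.Set.discard] using List.filter_sublist (l := PySem.Set.ofList ys)
        (p := fun y => !y == x)
  simpa [PySem.List.dedup] using h xs

theorem pv_mu_sublist {xs ys : List (List Char)} (h : xs.Sublist ys) : pvMu xs ≤ pvMu ys := by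
  unfold pvMu
  induction h with
  | slnil => exact le_rfl
  | cons a h ih => simp only [List.map_cons, List.sum_cons]; omega
  | cons₂ a h ih => simp only [List.map_cons, List.sum_cons]; omega

theorem pv_letters_nodup (ws : List (List Char)) : (pvLettersB ws).Nodup := by
  simpa [pvLettersB, PySem.List.dedup] using PySem.Set.nodup_ofList (ws.filterMap List.head?)

theorem pv_sum_split (f : Char → Nat) : ∀ (L : List Char), L.Nodup → ∀ {c0 : Char}, c0 ∈ L →
    (L.map f).sum = f c0 + ((L.filter (fun y => !y == c0)).map f).sum := by
  intro L
  induction L with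
  | nil => intro _ c0 h; cases h
  | cons a L ihL =>
    intro hnd c0 hmem
    rcases List.mem_cons.mp hmem with h | h
    · subst h
      have hnotin : c0 ∉ L := (List.nodup_cons.mp hnd).1
      have hfe : L.filter (fun y => !y == c0) = L :=
        List.filter_eq_self.mpr (fun b hb => by
          have hne : b ≠ c0 := fun e => hnotin (e ▸ hb)
          simp [hne])
      simp [hfe]
    · have hne : a ≠ c0 := by rintro rfl; exact (List.nodup_cons.mp hnd).1 h
      have hb : (a == c0) = false := by simp [hne]
      have hx := ihL (List.nodup_cons.mp hnd).2 h
      simp only [List.filter_cons, hb, Bool.not_false, if_pos, List.map_cons, List.sum_cons]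
      omega

theorem pv_sum_raw_le (ws : List (List Char)) :
    (((pvLettersB ws).map (fun c => pvMu (pvRawB c ws) + 1)).sum) ≤ pvMu ws := by
  induction ws with
  | nil => simp [pvLettersB, PySem.List.dedup, PySem.Set.ofList, pvMu]
  | cons w ws ih =>
    cases w with
    | nil =>
      have h1 : pvLettersB ([] :: ws) = pvLettersB ws := by simp [pvLettersB]
      have h3 : pvMu ([] :: ws) = pvMu ws := by simp [pvMu]
      rw [h1, h3, List.map_congr_left (fun c _ => by
        have h2 : pvRawB c ([] :: ws) = pvRawB c ws := by simp [pvRawB]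
        rw [h2])]
      exact ih
    | cons c0 t =>
      have hnd : (pvLettersB ws).Nodup := pv_letters_nodup ws
      have hL : pvLettersB ((c0 :: t) :: ws) = c0 :: (pvLettersB ws).filter (fun y => !y == c0) := by
        simp only [pvLettersB, PySem.List.dedup, List.filterMap_cons, List.head?_cons]
        rw [PySem.Set.ofList_cons]
        rfl
      have hRself : pvRawB c0 ((c0 :: t) :: ws) = t :: pvRawB c0 ws := by
        simp [pvRawB]
      rw [hL]
      simp only [List.map_cons, List.sum_cons]
      rw [hRself]
      have hmap : ((pvLettersB ws).filter (fun y => !y == c0)).map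
            (fun c => pvMu (pvRawB c ((c0 :: t) :: ws)) + 1)
          = ((pvLettersB ws).filter (fun y => !y == c0)).map (fun c => pvMu (pvRawB c ws) + 1) := by
        refine List.map_congr_left (fun c hc => ?_)
        have hcc : c ≠ c0 := by
          have := List.of_mem_filter hc
          simpa using this
        have hb : (c0 == c) = false := by simp [Ne.symm hcc]
        have hRother : pvRawB c ((c0 :: t) :: ws) = pvRawB c ws := by
          simp [pvRawB, hb]
        rw [hRother]
      rw [hmap]
      have hmu : pvMu ((c0 :: t) :: ws) = (t.length + 1) + pvMu ws := by
        simp only [pvMu, List.map_cons, List.sum_cons, List.length_cons]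
      have hmut : pvMu (t :: pvRawB c0 ws) = t.length + pvMu (pvRawB c0 ws) := by
        simp only [pvMu, List.map_cons, List.sum_cons]
      rw [hmu, hmut]
      by_cases hmem : c0 ∈ pvLettersB ws
      · have hsplit : ((pvLettersB ws).map (fun c => pvMu (pvRawB c ws) + 1)).sum
            = (pvMu (pvRawB c0 ws) + 1)
              + (((pvLettersB ws).filter (fun y => !y == c0)).map
                  (fun c => pvMu (pvRawB c ws) + 1)).sum :=
          pv_sum_split (fun c => pvMu (pvRawB c ws) + 1) (pvLettersB ws) hnd hmem
        omega
      · have hraw0 : pvRawB c0 ws = [] := by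
          have hfil : ws.filter (fun w => w.head? == some c0) = [] := by
            rw [List.filter_eq_nil_iff]
            intro w hw hp
            apply hmem
            have hw0 : w.head? = some c0 := by simpa using hp
            have hin : c0 ∈ ws.filterMap List.head? := List.mem_filterMap.mpr ⟨w, hw, hw0⟩
            simpa [pvLettersB, PySem.List.dedup, PySem.Set.mem_ofList] using hin
          simp [pvRawB, hfil]
        have hfid : (pvLettersB ws).filter (fun y => !y == c0) = pvLettersB ws :=
          List.filter_eq_self.mpr (fun b hb => by
            have hbc : b ≠ c0 := fun e => hmem (e ▸ hb)
            simp [hbc])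
        rw [hraw0, hfid]
        have hz : pvMu ([] : List (List Char)) = 0 := by simp [pvMu]
        omega

theorem pv_key_ineq (ws : List (List Char)) :
    (((pvLettersB ws).map (fun c => pvMu (pvSufsB c ws) + 1)).sum) ≤ pvMu ws := by
  refine le_trans (List.sum_le_sum ?_) (pv_sum_raw_le ws)
  intro c _
  have h := pv_mu_sublist (pv_dedup_sublist (pvRawB c ws))
  simp only [pvSufsB]
  omega

theorem pv_mu_sufs_lt {c : Char} {ws : List (List Char)} (h : c ∈ pvLettersB ws) :
    pvMu (pvSufsB c ws) < pvMu ws := by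
  have hmem : pvMu (pvSufsB c ws) + 1 ∈ (pvLettersB ws).map (fun c => pvMu (pvSufsB c ws) + 1) :=
    List.mem_map_of_mem h
  have h1 := List.single_le_sum (l := (pvLettersB ws).map (fun c => pvMu (pvSufsB c ws) + 1))
    (fun x _ => Nat.zero_le x) _ hmem
  have h2 := pv_key_ineq ws
  omega

-- ---- A's grouping dict described through B's letters/suffix functions ----
theorem pv_groups_keys (ws : List (List Char)) : (pvGroupsA ws).keys = pvLettersB ws := by
  have gen : ∀ (l : List (List Char)) (d : PySem.Dict Char (PySem.Set (List Char))),
      (l.foldl (fun d word =>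
        match word with
        | [] => d
        | c :: rest => d.modify c [] (fun s => PySem.Set.add s rest)) d).keys
        = PySem.Set.update d.keys (l.filterMap List.head?) := by
    intro l
    induction l with
    | nil => intro d; simp [PySem.Set.update]
    | cons w l ih =>
      intro d
      cases w with
      | nil => simpa using ih d
      | cons c rest =>
        simp only [List.foldl_cons, List.filterMap_cons, List.head?_cons]
        rw [ih, PySem.Set.update_cons]
        congr 1
        rw [PySem.Dict.keys_modify]
        by_cases hc : d.contains c = true
        · rw [PySem.Dict.keys_insert_of_contains _ _ hc,
            PySem.Set.add_of_mem ((PySem.Dict.contains_iff_mem_keys d c).mp hc)]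
        · have hc' : d.contains c = false := by simpa using hc
          rw [PySem.Dict.keys_insert_of_not_contains _ _ hc',
            PySem.Set.add_of_not_mem (fun hm => by
              rw [(PySem.Dict.contains_iff_mem_keys d c).mpr hm] at hc'; cases hc')]
  have h := gen ws PySem.Dict.empty
  simpa [pvGroupsA, pvLettersB, PySem.List.dedup, PySem.Dict.keys_empty] using h

theorem pv_groups_getD (ws : List (List Char)) (c : Char) :
    (pvGroupsA ws).getD c [] = pvSufsB c ws := by
  have gen : ∀ (l : List (List Char)) (d : PySem.Dict Char (PySem.Set (List Char))) (c : Char),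
      (l.foldl (fun d word =>
        match word with
        | [] => d
        | c :: rest => d.modify c [] (fun s => PySem.Set.add s rest)) d).getD c []
        = (pvRawB c l).foldl PySem.Set.add (d.getD c []) := by
    intro l
    induction l with
    | nil => intro d c; simp [pvRawB]
    | cons w l ih =>
      intro d c
      cases w with
      | nil => simpa [pvRawB] using ih d c
      | cons c0 rest =>
        simp only [List.foldl_cons]
        rw [ih]
        by_cases hc : c = c0
        · subst hc
          have hr : pvRawB c ((c :: rest) :: l) = rest :: pvRawB c l := by
            simp [pvRawB]
          rw [hr]
          simp only [List.foldl_cons]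
          congr 1
          rw [PySem.Dict.getD_modify]
          simp
        · have hb : (c0 == c) = false := by simp [Ne.symm hc]
          have hr : pvRawB c ((c0 :: rest) :: l) = pvRawB c l := by
            simp [pvRawB, hb]
          rw [hr]
          congr 1
          rw [PySem.Dict.getD_modify]
          simp [hc]
  have h := gen ws PySem.Dict.empty c
  rw [show pvSufsB c ws = (pvRawB c ws).foldl PySem.Set.add PySem.Set.empty from
    PySem.Set.ofList_eq_foldl (pvRawB c ws)]
  simpa [pvGroupsA, PySem.Dict.getD_empty, PySem.Set.empty] using h

theorem pv_groups_items (ws : List (List Char)) :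
    (pvGroupsA ws).items = (pvLettersB ws).map (fun c => (c, pvSufsB c ws)) := by
  have hnd : (pvGroupsA ws).keys.Nodup := by
    rw [pv_groups_keys]; exact pv_letters_nodup ws
  rw [PySem.Dict.items_eq_map_keys (pvGroupsA ws) hnd [], pv_groups_keys]
  exact List.map_congr_left (fun c _ => by rw [pv_groups_getD])

-- ---- shape of the DFS enumeration ----
theorem pv_dfs_eq_cons (fuel : Nat) (ws : List (List Char)) :
    pvDfs fuel ws = ([], PySem.Set.ofList ws) :: (pvDfs fuel ws).tail := by
  cases fuel <;> rfl

theorem pv_mem_tail_dfs {fuel : Nat} {ws : List (List Char)} {q : List Char × PySem.Set (List Char)}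
    (h : q ∈ (pvDfs fuel ws).tail) : ∃ c p, q.1 = c :: p := by
  cases fuel with
  | zero => simp [pvDfs] at h
  | succ fuel =>
    simp only [pvDfs, List.tail_cons, List.mem_flatMap, List.mem_map] at h
    obtain ⟨c, _, ps, _, rfl⟩ := h
    exact ⟨c, ps.1, rfl⟩

theorem pv_nodup_flatMap_cons (L : List Char) (hL : L.Nodup) (K : Char → List (List Char))
    (hK : ∀ c, (K c).Nodup) : (L.flatMap (fun c => (K c).map (c :: ·))).Nodup := by
  induction L with
  | nil => simp
  | cons c L ihL =>
    simp only [List.flatMap_cons]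
    refine List.Nodup.append ?_ (ihL (List.nodup_cons.mp hL).2) ?_
    · exact (hK c).map (fun a b h => by injection h)
    · intro x hx hy
      obtain ⟨p, _, rfl⟩ := List.mem_map.mp hx
      obtain ⟨c', hc', hxin⟩ := List.mem_flatMap.mp hy
      obtain ⟨p', _, he⟩ := List.mem_map.mp hxin
      have hcc : c' = c := by
        have hh := congrArg List.head? he
        simpa using hh
      exact (List.nodup_cons.mp hL).1 (hcc ▸ hc')

theorem pv_dfs_keys_nodup (fuel : Nat) : ∀ (ws : List (List Char)),
    ((pvDfs fuel ws).map Prod.fst).Nodup := by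
  induction fuel with
  | zero => intro ws; simp [pvDfs]
  | succ fuel ih =>
    intro ws
    have hkeys : (pvDfs (fuel + 1) ws).map Prod.fst
        = [] :: (pvLettersB ws).flatMap (fun c =>
            ((pvDfs fuel (pvSufsB c ws)).map Prod.fst).map (fun p => c :: p)) := by
      simp [pvDfs, List.map_flatMap, List.map_map, Function.comp_def]
    rw [hkeys]
    refine List.nodup_cons.mpr ⟨?_, pv_nodup_flatMap_cons (pvLettersB ws) (pv_letters_nodup ws)
      (fun c => (pvDfs fuel (pvSufsB c ws)).map Prod.fst) (fun c => ih (pvSufsB c ws))⟩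
    intro hmem
    obtain ⟨c, _, hin⟩ := List.mem_flatMap.mp hmem
    obtain ⟨p, _, he⟩ := List.mem_map.mp hin
    exact List.cons_ne_nil _ _ he

theorem pv_flatMap_congr {α β : Type} {l : List α} {f g : α → List β}
    (h : ∀ a ∈ l, f a = g a) : l.flatMap f = l.flatMap g := by
  induction l with
  | nil => rfl
  | cons a l ih =>
    simp only [List.flatMap_cons]
    rw [h a (by simp), ih (fun b hb => h b (by simp [hb]))]

theorem pv_dfs_congr : ∀ (f1 : Nat) (ws : List (List Char)) (f2 : Nat),
    pvMu ws < f1 → pvMu ws < f2 → pvDfs f1 ws = pvDfs f2 ws := by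
  intro f1
  induction f1 with
  | zero => intro ws f2 h1 _; exact absurd h1 (Nat.not_lt_zero _)
  | succ f1 ih =>
    intro ws f2 h1 h2
    cases f2 with
    | zero => exact absurd h2 (Nat.not_lt_zero _)
    | succ f2 =>
      simp only [pvDfs]
      congr 1
      refine pv_flatMap_congr (fun c hc => ?_)
      have hlt := pv_mu_sufs_lt hc
      rw [ih (pvSufsB c ws) f2 (by omega) (by omega)]

-- ---- A equals the DFS enumeration ----
theorem pv_block (f : Nat) (ws : List (List Char)) (c : Char)
    (acc : PySem.Dict (List Char) (PySem.Set (List Char)))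
    (hfresh : ∀ k ∈ acc.keys, k.head? ≠ some c)
    (hrec : (pvARec f (pvSufsB c ws)).items = pvDfs f (pvSufsB c ws)) :
    (((pvARec f (pvSufsB c ws)).items).foldl (fun a ps => a.insert (c :: ps.1) ps.2)
        (acc.insert [c] (PySem.Set.ofList (pvSufsB c ws)))).items
      = acc.items ++ (pvDfs f (pvSufsB c ws)).map (fun ps => (c :: ps.1, ps.2)) := by
  have hnc : acc.contains [c] = false := by
    by_contra h
    have h' : acc.contains [c] = true := by simpa using h
    exact hfresh _ ((PySem.Dict.contains_iff_mem_keys _ _).mp h') rfl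
  have hkeysins : (acc.insert [c] (PySem.Set.ofList (pvSufsB c ws))).keys = acc.keys ++ [[c]] :=
    PySem.Dict.keys_insert_of_not_contains _ _ hnc
  have htailnd : (((pvDfs f (pvSufsB c ws)).tail).map (fun ps => c :: ps.1)).Nodup := by
    have h0 := pv_dfs_keys_nodup f (pvSufsB c ws)
    rw [pv_dfs_eq_cons f (pvSufsB c ws), List.map_cons] at h0
    have h1 := (List.nodup_cons.mp h0).2
    have h2 : ((pvDfs f (pvSufsB c ws)).tail).map (fun ps => c :: ps.1)
        = (((pvDfs f (pvSufsB c ws)).tail).map Prod.fst).map (fun p => c :: p) := by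
      simp [List.map_map, Function.comp_def]
    rw [h2]
    exact List.Nodup.map (fun a b h => by injection h) h1
  have hfr : ∀ a ∈ (pvDfs f (pvSufsB c ws)).tail,
      (acc.insert [c] (PySem.Set.ofList (pvSufsB c ws))).contains (c :: a.1) = false := by
    intro a ha
    by_contra hcon
    have h' : (acc.insert [c] (PySem.Set.ofList (pvSufsB c ws))).contains (c :: a.1) = true := by
      simpa using hcon
    have hm := (PySem.Dict.contains_iff_mem_keys _ _).mp h'
    rw [hkeysins] at hm
    rcases List.mem_append.mp hm with hm | hm
    · exact hfresh _ hm rfl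
    · obtain ⟨c', p, hp⟩ := pv_mem_tail_dfs ha
      simp [hp] at hm
  have hfold := PySem.Dict.items_foldl_insert_fresh ((pvDfs f (pvSufsB c ws)).tail)
    (fun ps => c :: ps.1) Prod.snd (acc.insert [c] (PySem.Set.ofList (pvSufsB c ws))) hfr htailnd
  rw [hrec]
  rw [pv_dfs_eq_cons f (pvSufsB c ws)]
  simp only [List.foldl_cons]
  rw [PySem.Dict.insert_insert_self]
  rw [hfold]
  rw [PySem.Dict.items_insert_of_not_contains _ _ hnc]
  simp [List.append_assoc]

theorem pv_inner (f : Nat) (ws : List (List Char)) :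
    ∀ (L : List Char) (acc : PySem.Dict (List Char) (PySem.Set (List Char))),
      L.Nodup →
      (∀ c ∈ L, (pvARec f (pvSufsB c ws)).items = pvDfs f (pvSufsB c ws)) →
      acc.keys.Nodup →
      (∀ k ∈ acc.keys, ∀ c ∈ L, k.head? ≠ some c) →
      (L.foldl (fun acc c =>
          ((pvARec f (pvSufsB c ws)).items).foldl (fun a ps => a.insert (c :: ps.1) ps.2)
            (acc.insert [c] (PySem.Set.ofList (pvSufsB c ws)))) acc).items
        = acc.items ++ L.flatMap (fun c =>
            (pvDfs f (pvSufsB c ws)).map (fun ps => (c :: ps.1, ps.2))) := by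
  intro L
  induction L with
  | nil => intro acc _ _ _ _; simp
  | cons c L ihL =>
    intro acc hndL hrec hndk hfresh
    simp only [List.foldl_cons, List.flatMap_cons]
    have hblock := pv_block f ws c acc (fun k hk => hfresh k hk c (by simp)) (hrec c (by simp))
    set acc' := ((pvARec f (pvSufsB c ws)).items).foldl (fun a ps => a.insert (c :: ps.1) ps.2)
        (acc.insert [c] (PySem.Set.ofList (pvSufsB c ws))) with hacc'
    have hkeys' : acc'.keys = acc.keys ++ ((pvDfs f (pvSufsB c ws)).map Prod.fst).map
        (fun p => c :: p) := by
      show acc'.items.map Prod.fst = _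
      rw [hblock]
      simp [PySem.Dict.keys, List.map_map, Function.comp_def]
    have hnd' : acc'.keys.Nodup := by
      rw [hkeys']
      refine List.Nodup.append hndk
        (List.Nodup.map (fun a b h => by injection h) (pv_dfs_keys_nodup f (pvSufsB c ws))) ?_
      intro x hx hy
      obtain ⟨p, _, rfl⟩ := List.mem_map.mp hy
      exact hfresh _ hx c (by simp) rfl
    have hfresh' : ∀ k ∈ acc'.keys, ∀ c' ∈ L, k.head? ≠ some c' := by
      intro k hk c' hc' he
      rw [hkeys'] at hk
      rcases List.mem_append.mp hk with hk | hk
      · exact hfresh k hk c' (by simp [hc']) he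
      · obtain ⟨p, _, rfl⟩ := List.mem_map.mp hk
        simp only [List.head?_cons, Option.some.injEq] at he
        cases he
        exact (List.nodup_cons.mp hndL).1 hc'
    rw [ihL acc' (List.nodup_cons.mp hndL).2 (fun c' h' => hrec c' (by simp [h'])) hnd' hfresh']
    rw [hblock, List.append_assoc]

theorem pv_A_eq_dfs : ∀ (fuel : Nat) (ws : List (List Char)), pvMu ws < fuel →
    (pvARec fuel ws).items = pvDfs fuel ws := by
  intro fuel
  induction fuel with
  | zero => intro ws h; exact absurd h (Nat.not_lt_zero _)
  | succ fuel ih =>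
    intro ws h
    have hrec : ∀ c ∈ pvLettersB ws,
        (pvARec fuel (pvSufsB c ws)).items = pvDfs fuel (pvSufsB c ws) := by
      intro c hc
      exact ih _ (by have := pv_mu_sufs_lt hc; omega)
    have hbase : (PySem.Dict.empty.insert ([] : List Char) (PySem.Set.ofList ws)).items
        = [([], PySem.Set.ofList ws)] := by
      rw [PySem.Dict.items_insert_of_not_contains _ _ (PySem.Dict.contains_empty _)]
      rfl
    have hkeys0 : (PySem.Dict.empty.insert ([] : List Char) (PySem.Set.ofList ws)).keys
        = [([] : List Char)] := by
      rw [PySem.Dict.keys_insert_of_not_contains _ _ (PySem.Dict.contains_empty _),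
        PySem.Dict.keys_empty]
      rfl
    have hknd : (PySem.Dict.empty.insert ([] : List Char) (PySem.Set.ofList ws)).keys.Nodup := by
      rw [hkeys0]; simp
    have hkfresh : ∀ k ∈ (PySem.Dict.empty.insert ([] : List Char) (PySem.Set.ofList ws)).keys,
        ∀ c ∈ pvLettersB ws, k.head? ≠ some c := by
      intro k hk c _
      rw [hkeys0] at hk
      simp only [List.mem_singleton] at hk
      subst hk
      simp
    simp only [pvARec]
    rw [pv_groups_items, List.foldl_map]
    show ((pvLettersB ws).foldl (fun acc c =>
        ((pvARec fuel (pvSufsB c ws)).items).foldl (fun a ps => a.insert (c :: ps.1) ps.2)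
          (acc.insert [c] (PySem.Set.ofList (pvSufsB c ws))))
        (PySem.Dict.empty.insert [] (PySem.Set.ofList ws))).items = pvDfs (fuel + 1) ws
    rw [pv_inner fuel ws (pvLettersB ws) _ (pv_letters_nodup ws) hrec hknd hkfresh, hbase]
    simp [pvDfs]

-- ---- B equals the DFS enumeration ----
theorem pv_push_eq {α β : Type} (l : List α) (g : α → β) (rest : List β) :
    l.reverse.foldl (fun st c => g c :: st) rest = l.map g ++ rest := by
  rw [List.foldl_reverse]
  induction l with
  | nil => rfl
  | cons a l ih => simp [ih]

theorem pv_B_eq_dfs : ∀ (fuel : Nat) (stack : List (List Char × List (List Char)))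
    (items : List (List Char × PySem.Set (List Char))),
    ((stack.map (fun pw => pvMu pw.2 + 1)).sum ≤ fuel) →
    pvBLoop fuel stack items =
      items ++ stack.flatMap (fun pw =>
        (pvDfs (pvMu pw.2 + 1) pw.2).map (fun ps => (pw.1 ++ ps.1, ps.2))) := by
  intro fuel
  induction fuel with
  | zero =>
    intro stack items h
    cases stack with
    | nil => simp [pvBLoop]
    | cons pw rest => simp at h
  | succ fuel ih =>
    intro stack items h
    cases stack with
    | nil => simp [pvBLoop]
    | cons pw rest =>
      simp only [pvBLoop]
      rw [pv_push_eq]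
      simp only [List.map_cons, List.sum_cons] at h
      have hkey := pv_key_ineq pw.2
      have hsum : ((((pvLettersB pw.2).map (fun c => (pw.1 ++ [c], pvSufsB c pw.2))
          ++ rest).map (fun pw => pvMu pw.2 + 1)).sum) ≤ fuel := by
        rw [List.map_append, List.sum_append, List.map_map]
        have he : ((pvLettersB pw.2).map ((fun pw => pvMu pw.2 + 1) ∘
            (fun c => (pw.1 ++ [c], pvSufsB c pw.2)))).sum
            = ((pvLettersB pw.2).map (fun c => pvMu (pvSufsB c pw.2) + 1)).sum := rfl
        rw [he]
        omega
      rw [ih _ _ hsum]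
      rw [List.flatMap_append]
      have hchil : ((pvLettersB pw.2).map (fun c => (pw.1 ++ [c], pvSufsB c pw.2))).flatMap
            (fun pw => (pvDfs (pvMu pw.2 + 1) pw.2).map (fun ps => (pw.1 ++ ps.1, ps.2)))
          = (pvLettersB pw.2).flatMap (fun c =>
              (pvDfs (pvMu pw.2) (pvSufsB c pw.2)).map
                (fun ps => (pw.1 ++ (c :: ps.1), ps.2))) := by
        rw [List.flatMap_map]
        refine pv_flatMap_congr (fun c hc => ?_)
        have hlt := pv_mu_sufs_lt hc
        show (pvDfs (pvMu (pvSufsB c pw.2) + 1) (pvSufsB c pw.2)).map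
            (fun ps => ((pw.1 ++ [c]) ++ ps.1, ps.2)) = _
        rw [pv_dfs_congr (pvMu (pvSufsB c pw.2) + 1) (pvSufsB c pw.2) (pvMu pw.2)
          (Nat.lt_succ_self _) hlt]
        refine List.map_congr_left (fun ps _ => ?_)
        simp [List.append_assoc]
      rw [hchil]
      have hhead : (pvDfs (pvMu pw.2 + 1) pw.2).map (fun ps => (pw.1 ++ ps.1, ps.2))
          = (pw.1, PySem.Set.ofList pw.2) ::
            (pvLettersB pw.2).flatMap (fun c =>
              (pvDfs (pvMu pw.2) (pvSufsB c pw.2)).map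
                (fun ps => (pw.1 ++ (c :: ps.1), ps.2))) := by
        simp only [pvDfs, List.map_cons, List.append_nil, List.map_flatMap, List.map_map]
        rfl
      rw [List.flatMap_cons, hhead]
      simp [List.append_assoc]

-- ===== VERDICT (by name: the statement is the Claim_ definition above) =====
theorem get_prefix_to_subset_spec : Claim_equal_get_prefix_to_subset := by
  unfold Claim_equal_get_prefix_to_subset
  intro ws _ hpre
  unfold Spec_get_prefix_to_subset get_prefix_to_subset get_prefix_to_subset_alt
  have hded : PySem.List.dedup ws = ws := by
    simpa [PySem.List.dedup] using PySem.Set.ofList_eq_self_of_nodup ws hpre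
  rw [hded, pv_muB_eq]
  rw [pv_A_eq_dfs _ _ (Nat.lt_succ_self _)]
  rw [pv_B_eq_dfs _ _ _ (by simp)]
  simp only [List.flatMap_cons, List.flatMap_nil, List.append_nil, List.nil_append]
  have hid : (pvDfs (pvMu (ws.map String.toList) + 1) (ws.map String.toList)).map
      (fun ps => (ps.1, ps.2))
      = pvDfs (pvMu (ws.map String.toList) + 1) (ws.map String.toList) := by
    simp
  rw [hid]
  have hof : (PySem.Dict.ofList (pvDfs (pvMu (ws.map String.toList) + 1)
      (ws.map String.toList))).items
      = pvDfs (pvMu (ws.map String.toList) + 1) (ws.map String.toList) := by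
    have hfold := PySem.Dict.items_foldl_insert_fresh
      (pvDfs (pvMu (ws.map String.toList) + 1) (ws.map String.toList)) Prod.fst Prod.snd
      PySem.Dict.empty (fun a _ => PySem.Dict.contains_empty _)
      (pv_dfs_keys_nodup _ _)
    simpa [PySem.Dict.ofList, PySem.Dict.update] using hfold
  rw [hof]
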